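-- pv_equiv track=rewrite | github.com/fanzou2020/Parsing | Parsing1/GenerateTruthTable.py | next_assignment
-- ===== SOURCE A (Python) =====
-- def next_assignment(assignment):
--     # Walking from the right to left, search for a false to make it true.
--     flip_index = len(assignment) - 1
--     while flip_index >= 0 and assignment[flip_index]:
--         flip_index -= 1
--
--     # If we didn't find an index to flip, we've tried all possibilities, and therefore are done.
--     if flip_index == -1:
--         return False
--
--     # Otherwise, flip this index to true and all following values to false.
--     assignment[flip_index] = True
--     for i in range(flip_index + 1, len(assignment)):
--         assignment[i] = False
--
--     return True
-- ===== SOURCE B (Python) =====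
-- def next_assignment(assignment):
--     # Binary increment as a uniform carry ripple: walking from the right,
--     # each output bit is b XOR carry and the carry is b AND carry.
--     carry = True
--     out = []
--     for b in reversed(assignment):
--         out.append(b != carry)
--         carry = b and carry
--     if carry:
--         return False
--     assignment[:] = reversed(out)
--     return True
-- ===== Notes on version B (the rewrite author's own statement) =====
-- stated objective: alternative
-- what changed: Replaces A's find-rightmost-False pivot search plus flip/clear writes with a uniform binary-increment carry ripple (bit XOR carry, carry AND bit) folded over the reversed list, writing the whole result back only when no overflow carry remains.
import Mathlib
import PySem

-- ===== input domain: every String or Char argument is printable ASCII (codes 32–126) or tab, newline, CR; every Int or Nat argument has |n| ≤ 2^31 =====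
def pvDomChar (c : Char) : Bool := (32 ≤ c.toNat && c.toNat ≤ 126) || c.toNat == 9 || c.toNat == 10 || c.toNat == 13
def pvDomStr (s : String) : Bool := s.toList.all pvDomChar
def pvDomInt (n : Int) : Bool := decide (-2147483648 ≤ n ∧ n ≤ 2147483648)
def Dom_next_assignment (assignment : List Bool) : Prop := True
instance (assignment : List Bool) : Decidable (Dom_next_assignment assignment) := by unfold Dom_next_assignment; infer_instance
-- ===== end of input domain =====

-- B replaces A's find-rightmost-False pivot search + flip/clear writes by a uniform binary-
-- increment carry ripple (bit XOR carry, carry AND bit) folded over the reversed list.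
-- Both Pythons mutate the list identically; the equivalence proved here is about the
-- RETURN value (the Lean signature returns only the Bool).

-- ===== PORT A =====
-- while flip_index >= 0 and assignment[flip_index]: flip_index -= 1
-- fuel = assignment.length suffices since flip_index starts at length-1 and decreases by 1.
def nextAssignmentLoopA (assignment : List Bool) : Nat → Int → Int
  | 0, i => i
  | fuel + 1, i =>
      if i ≥ 0 ∧ ((PySem.List.pyGet? assignment i).getD false) then
        nextAssignmentLoopA assignment fuel (i - 1)
      else i

def next_assignment (assignment : List Bool) : Bool :=
  let flipIndex := nextAssignmentLoopA assignment assignment.length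
                     ((assignment.length : Int) - 1)
  if flipIndex = -1 then false
  else
    -- the writes assignment[flip_index] = True; following = False mutate the list only;
    -- they do not affect the returned value
    true

-- ===== PORT B =====
def next_assignment_alt (assignment : List Bool) : Bool :=
  let st := assignment.reverse.foldl
      (fun (s : Bool × List Bool) b => (b && s.1, s.2 ++ [b != s.1])) (true, [])
  if st.1 then false
  else
    -- assignment[:] = reversed(out) mutates the list only; it does not affect the returned value
    true

-- ===== PRECONDITION & SPEC =====
def Spec_next_assignment (assignment : List Bool) (out : Bool) : Prop := out = next_assignment_alt assignment
instance (assignment : List Bool) (out : Bool) : Decidable (Spec_next_assignment assignment out) := by unfold Spec_next_assignment; infer_instance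

-- ===== CLAIM (what is proved, stated in full; the proofs are below) =====
def Claim_equal_next_assignment : Prop := ∀ (assignment : List Bool), Dom_next_assignment assignment → Spec_next_assignment assignment (next_assignment assignment)

-- ===== LEMMAS AND PROOFS =====

-- The carry component of B's fold ignores the output list being built.
theorem pv_carry_fst (l : List Bool) : ∀ (c : Bool) (o : List Bool),
    (l.foldl (fun (s : Bool × List Bool) b => (b && s.1, s.2 ++ [b != s.1])) (c, o)).1
      = l.foldl (fun c b => b && c) c := by
  induction l with
  | nil => intro c o; rfl
  | cons b t ih => intro c o; simp only [List.foldl_cons]; exact ih (b && c) (o ++ [b != c])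

-- Folding AND over the list computes `all` (times the seed).
theorem pv_and_fold (l : List Bool) : ∀ (c : Bool),
    l.foldl (fun c b => b && c) c = (l.all id && c) := by
  induction l with
  | nil => intro c; simp
  | cons b t ih =>
      intro c
      simp only [List.foldl_cons, List.all_cons, id]
      rw [ih (b && c)]
      cases b <;> cases c <;> simp

-- A's loop: starting at index i with fuel i+1, it reaches -1 iff the first i+1 entries are all true.
theorem pv_loopA_char (l : List Bool) : ∀ (i : Nat), i < l.length →
    (nextAssignmentLoopA l (i + 1) (i : Int) = -1 ↔ (l.take (i + 1)).all id) := by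
  intro i
  induction i with
  | zero =>
      intro h
      have hget : PySem.List.pyGet? l (0 : Int) = l[0]? := by
        simpa using PySem.List.pyGet?_natCast (xs := l) (n := 0)
      rcases l with _ | ⟨b, t⟩
      · simp at h
      · cases b <;> simp [nextAssignmentLoopA]
  | succ k ih =>
      intro h
      have hk : k < l.length := by omega
      have hsome : l[k + 1]? = some l[k + 1] := List.getElem?_eq_getElem h
      have hget : PySem.List.pyGet? l ((k : Int) + 1) = some l[k + 1] := by
        have := PySem.List.pyGet?_natCast (xs := l) (n := k + 1)
        push_cast at this
        rw [this, hsome]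
      have htake : l.take (k + 2) = l.take (k + 1) ++ [l[k + 1]] := by
        rw [List.take_add_one, hsome]; rfl
      rcases hb : l[k + 1] with _ | _
      · -- element false: loop stops at k+1 ≠ -1; the taken prefix contains a false
        have hstop : nextAssignmentLoopA l (k + 1 + 1) ((k : Int) + 1) = (k : Int) + 1 := by
          simp only [nextAssignmentLoopA, hget, hb]
          simp
        push_cast
        rw [hstop, htake]
        simp [hb]
        omega
      · -- element true: the loop recurses to index k with fuel k+1
        have hstep : nextAssignmentLoopA l (k + 1 + 1) ((k : Int) + 1)
            = nextAssignmentLoopA l (k + 1) ((k : Int)) := by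
          simp only [nextAssignmentLoopA, hget, hb]
          have h1 : (k : Int) + 1 - 1 = (k : Int) := by ring
          have hpos : (0:Int) ≤ (k : Int) + 1 := by positivity
          simp [h1, hpos]
        push_cast
        rw [hstep, htake]
        simp [hb, ih hk]

-- The two ports agree on every nonempty list.
theorem pv_main (l : List Bool) (n : Nat) (hn : l.length = n + 1) :
    next_assignment l = next_assignment_alt l := by
  unfold next_assignment next_assignment_alt
  have hA : nextAssignmentLoopA l l.length ((l.length : Int) - 1) = -1 ↔ l.all id := by
    rw [hn]
    have h1 : ((n + 1 : Nat) : Int) - 1 = (n : Int) := by push_cast; ring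
    rw [h1, pv_loopA_char l n (by omega)]
    rw [show l.take (n + 1) = l from List.take_of_length_le (by omega)]
  have hB : (l.reverse.foldl
        (fun (s : Bool × List Bool) b => (b && s.1, s.2 ++ [b != s.1])) (true, [])).1
      = l.all id := by
    rw [pv_carry_fst, pv_and_fold]
    simp [List.all_reverse]
  have hB' : (List.foldr (fun x y => (x && y.1, y.2 ++ [x != y.1])) (true, ([] : List Bool)) l).1
      = l.all id := by
    rw [← List.foldl_reverse]; exact hB
  by_cases hall : l.all id
  · simp [hA.mpr hall, hB', hall]
  · have h1 : ¬ nextAssignmentLoopA l l.length ((l.length : Int) - 1) = -1 := fun h => hall (hA.mp h)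
    have h2 : (List.foldr (fun x y => (x && y.1, y.2 ++ [x != y.1])) (true, ([] : List Bool)) l).1
        = false := by
      rw [hB']; simpa using hall
    simp [h1, h2]

-- ===== VERDICT (by name: the statement is the Claim_ definition above) =====
theorem next_assignment_spec : Claim_equal_next_assignment := by
  intro l _
  unfold Spec_next_assignment
  rcases l with _ | ⟨b, t⟩
  · simp [next_assignment, next_assignment_alt, nextAssignmentLoopA]
  · exact pv_main (b :: t) t.length (by simp)
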